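-- pv_equiv track=rewrite | github.com/stephenfeather/opc | scripts/core/extract_session.py | summarize_env_for_verbose
-- ===== SOURCE A (Python) =====
-- _SECRET_KEY_TOKENS: tuple[str, ...] = (
--     "KEY",
--     "TOKEN",
--     "SECRET",
--     "PASSWORD",
--     "PASSWD",
--     "DATABASE_URL",
--     "DSN",
--     "AUTH",
--     "CREDENTIAL",
--     "PRIVATE",
--     "CERT",
-- )
--
-- _REDACTED = "***REDACTED***"
--
-- _VERBOSE_ENV_PREFIX_ALLOWLIST: tuple[str, ...] = (
--     "CLAUDE_",
--     "OPC_",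
--     "PYTHONPATH",
-- )
--
-- def redact_env(env: dict[str, str]) -> dict[str, str]:
--     """Return a copy of ``env`` with secret-bearing values replaced.
--
--     A key is treated as a secret if any token in ``_SECRET_KEY_TOKENS``
--     appears (case-insensitively) in its name. The original dict is not
--     modified.
--     """
--     redacted: dict[str, str] = {}
--     for key, val in env.items():
--         upper = key.upper()
--         if any(token in upper for token in _SECRET_KEY_TOKENS):
--             redacted[key] = _REDACTED
--         else:
--             redacted[key] = val
--     return redacted
--
-- def summarize_env_for_verbose(
--     env: dict[str, str],
-- ) -> tuple[dict[str, str], int]: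
--     """Project an env dict to the keys safe to enumerate in --verbose output.
--
--     Returns a (visible, hidden_count) pair. Visible keys match an allowlist
--     prefix and have their values redacted via :func:`redact_env`. Hidden keys
--     are not enumerated — only their count is reported. This avoids leaking
--     the full parent-process environment even when values are safe.
--     """
--     redacted = redact_env(env)
--     visible: dict[str, str] = {}
--     hidden = 0
--     for key, val in redacted.items():
--         if any(key.startswith(prefix) for prefix in _VERBOSE_ENV_PREFIX_ALLOWLIST):
--             visible[key] = val
--         else:
--             hidden += 1
--     return visible, hidden
-- ===== SOURCE B (Python) =====
-- _SECRET_KEY_TOKENS: tuple[str, ...] = (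
--     "KEY",
--     "TOKEN",
--     "SECRET",
--     "PASSWORD",
--     "PASSWD",
--     "DATABASE_URL",
--     "DSN",
--     "AUTH",
--     "CREDENTIAL",
--     "PRIVATE",
--     "CERT",
-- )
--
-- _REDACTED = "***REDACTED***"
--
-- _VERBOSE_ENV_PREFIX_ALLOWLIST: tuple[str, ...] = (
--     "CLAUDE_",
--     "OPC_",
--     "PYTHONPATH",
-- )
--
--
-- def summarize_env_for_verbose(env):
--     """Single pass: filter first, redact only the visible keys inline."""
--     visible = {}
--     hidden = 0
--     for key, val in env.items():
--         if key.startswith(_VERBOSE_ENV_PREFIX_ALLOWLIST):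
--             upper = key.upper()
--             if any(token in upper for token in _SECRET_KEY_TOKENS):
--                 visible[key] = _REDACTED
--             else:
--                 visible[key] = val
--         else:
--             hidden += 1
--     return visible, hidden
-- ===== Notes on version B (the rewrite author's own statement) =====
-- stated objective: simpler
-- what changed: B fuses A's two passes (redact_env over the whole dict, then an allowlist filter over the redacted copy) into one loop over env.items() that filters first and redacts only the visible keys inline, never building the intermediate full redacted dict.
import Mathlib
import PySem

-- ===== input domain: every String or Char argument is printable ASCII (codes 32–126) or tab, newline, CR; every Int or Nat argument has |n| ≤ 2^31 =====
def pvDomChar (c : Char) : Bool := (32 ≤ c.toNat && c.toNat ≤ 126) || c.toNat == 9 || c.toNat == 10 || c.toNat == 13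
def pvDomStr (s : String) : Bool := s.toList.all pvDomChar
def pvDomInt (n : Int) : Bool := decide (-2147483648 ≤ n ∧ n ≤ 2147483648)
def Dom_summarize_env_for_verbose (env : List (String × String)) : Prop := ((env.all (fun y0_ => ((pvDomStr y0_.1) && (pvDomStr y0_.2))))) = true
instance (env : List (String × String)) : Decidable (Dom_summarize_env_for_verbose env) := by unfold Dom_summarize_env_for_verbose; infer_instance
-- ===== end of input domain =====

-- B fuses A's redact-all pass + allowlist-filter pass into one loop that filters first
-- and redacts inline; objective: simpler (no intermediate full redacted dict).

-- ===== PORT A =====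
def pvSecretTokens : List String :=
  ["KEY", "TOKEN", "SECRET", "PASSWORD", "PASSWD", "DATABASE_URL", "DSN",
   "AUTH", "CREDENTIAL", "PRIVATE", "CERT"]

def pvRedactedStr : String := "***REDACTED***"

def pvAllowPrefixes : List String := ["CLAUDE_", "OPC_", "PYTHONPATH"]

def redact_env (env : List (String × String)) : PySem.Dict String String :=
  env.foldl (fun red kv =>
    let upper := PySem.Str.upper kv.1
    if pvSecretTokens.any (fun t => PySem.Str.isIn t upper) then
      red.insert kv.1 pvRedactedStr
    else
      red.insert kv.1 kv.2) PySem.Dict.empty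

def summarize_env_for_verbose (env : List (String × String)) : (List (String × String)) × Int :=
  let redacted := redact_env env
  let st := redacted.items.foldl
    (fun (st : PySem.Dict String String × Int) kv =>
      if pvAllowPrefixes.any (fun p => PySem.Str.startswith kv.1 p) then
        (st.1.insert kv.1 kv.2, st.2)
      else
        (st.1, st.2 + 1)) (PySem.Dict.empty, 0)
  (st.1.items, st.2)

-- ===== PORT B =====
def summarize_env_for_verbose_alt (env : List (String × String)) : (List (String × String)) × Int :=
  let st := env.foldl
    (fun (st : PySem.Dict String String × Int) kv =>
      if pvAllowPrefixes.any (fun p => PySem.Str.startswith kv.1 p) then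
        let upper := PySem.Str.upper kv.1
        if pvSecretTokens.any (fun t => PySem.Str.isIn t upper) then
          (st.1.insert kv.1 pvRedactedStr, st.2)
        else
          (st.1.insert kv.1 kv.2, st.2)
      else
        (st.1, st.2 + 1)) (PySem.Dict.empty, 0)
  (st.1.items, st.2)

-- ===== PRECONDITION & SPEC =====
-- Pre_ excludes association lists with duplicate keys: Python's argument is a dict, whose
-- keys are unique, so such lists do not represent any Python input.
def Pre_summarize_env_for_verbose (env : List (String × String)) : Prop :=
  (env.map Prod.fst).Nodup

instance (env : List (String × String)) : Decidable (Pre_summarize_env_for_verbose env) := by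
  unfold Pre_summarize_env_for_verbose; infer_instance

def pvWitness_summarize_env_for_verbose : (List (String × String)) :=
  [("CLAUDE_API_KEY", "x"), ("OPC_MODE", "fast"), ("HOME", "/root")]

def Spec_summarize_env_for_verbose (env : List (String × String)) (out : (List (String × String)) × Int) : Prop := out = summarize_env_for_verbose_alt env
instance (env : List (String × String)) (out : (List (String × String)) × Int) : Decidable (Spec_summarize_env_for_verbose env out) := by unfold Spec_summarize_env_for_verbose; infer_instance

-- ===== CLAIM (what is proved, stated in full; the proofs are below) =====
def Claim_equal_summarize_env_for_verbose : Prop := ∀ (env : List (String × String)), Dom_summarize_env_for_verbose env → Pre_summarize_env_for_verbose env → Spec_summarize_env_for_verbose env (summarize_env_for_verbose env)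

-- ===== LEMMAS AND PROOFS =====

-- redacted key/value pair, and visibility of a key (proof-side abbreviations)
def pvRed (kv : String × String) : String × String :=
  (kv.1, if pvSecretTokens.any (fun t => PySem.Str.isIn t (PySem.Str.upper kv.1)) then pvRedactedStr else kv.2)

def pvVis (k : String) : Bool := pvAllowPrefixes.any (fun p => PySem.Str.startswith k p)

theorem redact_env_items (env : List (String × String))
    (h : (env.map Prod.fst).Nodup) :
    (redact_env env).items = env.map pvRed := by
  have hfun : (fun (red : PySem.Dict String String) (kv : String × String) =>
      let upper := PySem.Str.upper kv.1
      if pvSecretTokens.any (fun t => PySem.Str.isIn t upper) then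
        red.insert kv.1 pvRedactedStr
      else
        red.insert kv.1 kv.2)
      = (fun red kv => red.insert kv.1 ((pvRed kv).2)) := by
    funext red kv
    simp only [pvRed, apply_ite (red.insert kv.1)]
  unfold redact_env
  rw [hfun,
    PySem.Dict.items_foldl_insert_fresh env Prod.fst (fun kv => (pvRed kv).2)
      PySem.Dict.empty (by intro a _; exact PySem.Dict.contains_empty _) h]
  have hfn : (fun (a : String × String) => (a.1, (pvRed a).2)) = pvRed := funext fun a => rfl
  rw [hfn]
  rfl

-- A's second loop: visible pairs are inserted in order, hidden pairs counted
theorem filter_loop (xs : List (String × String)) :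
    ∀ (d : PySem.Dict String String) (h : Int),
    (∀ kv ∈ xs, d.contains kv.1 = false) → (xs.map Prod.fst).Nodup →
    xs.foldl (fun (st : PySem.Dict String String × Int) kv =>
        if pvAllowPrefixes.any (fun p => PySem.Str.startswith kv.1 p) then
          (st.1.insert kv.1 kv.2, st.2)
        else (st.1, st.2 + 1)) (d, h)
    = (PySem.Dict.mk (d.items ++ xs.filter (fun kv => pvVis kv.1)),
       h + (xs.countP (fun kv => !pvVis kv.1) : Int)) := by
  induction xs with
  | nil =>
    intro d h _ _
    simp [List.countP]
  | cons kv tl ih =>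
    intro d h hfresh hnd
    rw [List.map_cons] at hnd
    have hnd' := List.nodup_cons.mp hnd
    have hne : ∀ kv' ∈ tl, kv'.1 ≠ kv.1 := by
      intro kv' hm heq
      exact hnd'.1 (heq ▸ List.mem_map_of_mem hm)
    by_cases hv : (pvAllowPrefixes.any (fun p => PySem.Str.startswith kv.1 p)) = true
    · have hc : d.contains kv.1 = false := hfresh kv (by simp)
      have hitems : (d.insert kv.1 kv.2).items = d.items ++ [(kv.1, kv.2)] := by
        rw [PySem.Dict.items_insert_of_not_contains _ _ hc]
      have hfresh' : ∀ kv' ∈ tl, (d.insert kv.1 kv.2).contains kv'.1 = false := by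
        intro kv' hm
        rw [PySem.Dict.contains_insert]
        simp [hne kv' hm, hfresh kv' (by simp [hm])]
      simp only [List.foldl_cons, hv, if_true]
      rw [ih (d.insert kv.1 kv.2) h hfresh' hnd'.2]
      have hvv : pvVis kv.1 = true := hv
      simp [hitems, hvv]
    · simp only [List.foldl_cons, hv, if_false, Bool.false_eq_true]
      rw [ih d (h + 1) (fun kv' hm => hfresh kv' (by simp [hm])) hnd'.2]
      have hvv : pvVis kv.1 = false := by simpa [pvVis] using hv
      simp only [List.filter_cons, List.countP_cons]
      simp [hvv]
      ring_nf

-- B's fused loop: filter first, redact inline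
theorem fused_loop (xs : List (String × String)) :
    ∀ (d : PySem.Dict String String) (h : Int),
    (∀ kv ∈ xs, d.contains kv.1 = false) → (xs.map Prod.fst).Nodup →
    xs.foldl (fun (st : PySem.Dict String String × Int) kv =>
        if pvAllowPrefixes.any (fun p => PySem.Str.startswith kv.1 p) then
          let upper := PySem.Str.upper kv.1
          if pvSecretTokens.any (fun t => PySem.Str.isIn t upper) then
            (st.1.insert kv.1 pvRedactedStr, st.2)
          else
            (st.1.insert kv.1 kv.2, st.2)
        else (st.1, st.2 + 1)) (d, h)
    = (PySem.Dict.mk (d.items ++ (xs.filter (fun kv => pvVis kv.1)).map pvRed),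
       h + (xs.countP (fun kv => !pvVis kv.1) : Int)) := by
  induction xs with
  | nil =>
    intro d h _ _
    simp [List.countP]
  | cons kv tl ih =>
    intro d h hfresh hnd
    rw [List.map_cons] at hnd
    have hnd' := List.nodup_cons.mp hnd
    have hne : ∀ kv' ∈ tl, kv'.1 ≠ kv.1 := by
      intro kv' hm heq
      exact hnd'.1 (heq ▸ List.mem_map_of_mem hm)
    by_cases hv : (pvAllowPrefixes.any (fun p => PySem.Str.startswith kv.1 p)) = true
    · have hvv : pvVis kv.1 = true := hv
      have hc : d.contains kv.1 = false := hfresh kv (by simp)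
      have hitems : ∀ v, (d.insert kv.1 v).items = d.items ++ [(kv.1, v)] := by
        intro v; rw [PySem.Dict.items_insert_of_not_contains _ _ hc]
      have hfresh' : ∀ v, ∀ kv' ∈ tl, (d.insert kv.1 v).contains kv'.1 = false := by
        intro v kv' hm
        rw [PySem.Dict.contains_insert]
        simp [hne kv' hm, hfresh kv' (by simp [hm])]
      by_cases hs : (pvSecretTokens.any (fun t => PySem.Str.isIn t (PySem.Str.upper kv.1))) = true
      · have hred : pvRed kv = (kv.1, pvRedactedStr) := by unfold pvRed; rw [if_pos hs]
        simp only [List.foldl_cons, hv, hs, if_true]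
        rw [ih (d.insert kv.1 pvRedactedStr) h (hfresh' _) hnd'.2]
        simp [hitems, hvv, hred]
      · have hred : pvRed kv = (kv.1, kv.2) := by unfold pvRed; rw [if_neg hs]
        simp only [List.foldl_cons, hv, hs, if_true, if_false, Bool.false_eq_true]
        rw [ih (d.insert kv.1 kv.2) h (hfresh' _) hnd'.2]
        simp [hitems, hvv, hred]
    · have hvv : pvVis kv.1 = false := by simpa [pvVis] using hv
      simp only [List.foldl_cons, hv, if_false, Bool.false_eq_true]
      rw [ih d (h + 1) (fun kv' hm => hfresh kv' (by simp [hm])) hnd'.2]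
      simp only [List.filter_cons, List.countP_cons]
      simp [hvv]
      ring_nf

theorem map_fst_pvRed (env : List (String × String)) :
    (env.map pvRed).map Prod.fst = env.map Prod.fst := by
  rw [List.map_map]
  rfl

-- ===== VERDICT (by name: the statement is the Claim_ definition above) =====
theorem summarize_env_for_verbose_spec : Claim_equal_summarize_env_for_verbose := by
  intro env _ hpre
  unfold Spec_summarize_env_for_verbose
  unfold Pre_summarize_env_for_verbose at hpre
  show summarize_env_for_verbose env = summarize_env_for_verbose_alt env
  simp only [summarize_env_for_verbose, summarize_env_for_verbose_alt]
  rw [redact_env_items env hpre]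
  have hndR : ((env.map pvRed).map Prod.fst).Nodup := by
    rw [map_fst_pvRed]; exact hpre
  rw [filter_loop (env.map pvRed) PySem.Dict.empty 0
        (by intro a _; exact PySem.Dict.contains_empty _) hndR]
  rw [fused_loop env PySem.Dict.empty 0
        (by intro a _; exact PySem.Dict.contains_empty _) hpre]
  have hfilter : (env.map pvRed).filter (fun kv => pvVis kv.1)
      = (env.filter (fun kv => pvVis kv.1)).map pvRed := by
    rw [List.filter_map]
    rfl
  have hcount : (env.map pvRed).countP (fun kv => !pvVis kv.1)
      = env.countP (fun kv => !pvVis kv.1) := by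
    rw [List.countP_map]
    rfl
  rw [hfilter, hcount]
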